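-- pv_equiv track=rewrite | github.com/OpenPecha/fodian_text_extractor | extract_index.py | get_segment_annotation
-- ===== SOURCE A (Python) =====
-- def get_segment_annotation(chapter_flat):
--     annotation = []
--     pos = 0
--     for segment in chapter_flat:
--         start = pos
--         end = pos + len(segment)
--         # if end == start:
--         #     start = 0
--         #     end = 0
--         annotation.append({
--             "span": {
--                 "start": start,
--                 "end": end
--             }
--         })
--         pos = end
--     return annotation
-- ===== SOURCE B (Python) =====
-- def get_segment_annotation(chapter_flat):
--     # phase 1: segment lengths; phase 2: prefix-sum boundary table; phase 3: pair consecutive boundaries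
--     lengths = [len(s) for s in chapter_flat]
--     bounds = [0]
--     acc = 0
--     for n in lengths:
--         acc = acc + n
--         bounds.append(acc)
--     return [{"span": {"start": start, "end": end}}
--             for start, end in zip(bounds, bounds[1:])]
-- ===== Notes on version B (the rewrite author's own statement) =====
-- stated objective: alternative
-- what changed: Replaces the incremental running-sum loop by a three-phase decomposition: a length list, a prefix-sum boundary table (itertools.accumulate with initial=0), and a zip of consecutive boundaries into spans.
import Mathlib
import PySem

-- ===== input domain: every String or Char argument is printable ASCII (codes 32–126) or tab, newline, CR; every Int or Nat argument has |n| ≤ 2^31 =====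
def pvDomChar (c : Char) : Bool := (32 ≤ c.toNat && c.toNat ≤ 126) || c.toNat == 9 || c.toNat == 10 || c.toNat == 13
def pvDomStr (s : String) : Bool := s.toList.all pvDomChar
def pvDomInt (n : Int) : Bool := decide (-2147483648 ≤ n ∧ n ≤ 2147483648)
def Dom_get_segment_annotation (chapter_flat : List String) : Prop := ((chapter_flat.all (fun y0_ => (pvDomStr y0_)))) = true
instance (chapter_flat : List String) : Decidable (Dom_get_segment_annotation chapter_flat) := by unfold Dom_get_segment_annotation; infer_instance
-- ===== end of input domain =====

-- B replaces A's incremental running-sum loop by a three-phase decomposition (lengths, prefix-sum boundary table, pairing of consecutive boundaries); same cost, alternative structure.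


-- ===== PORT A =====
-- A: one pass with a running position; each step appends {"span": {"start": pos, "end": pos+len}} and advances pos.
def get_segment_annotation (chapter_flat : List String) : List (List (String × List (String × Int))) :=
  (chapter_flat.foldl
    (fun (st : List (List (String × List (String × Int))) × Int) segment =>
      let start := st.2
      let e := st.2 + PySem.Str.len segment
      (st.1 ++ [[("span", [("start", start), ("end", e)])]], e))
    ([], 0)).1

-- ===== PORT B =====
-- B: lengths list, then prefix-sum boundary table starting at 0, then pair consecutive boundaries.
def get_segment_annotation_alt (chapter_flat : List String) : List (List (String × List (String × Int))) :=
  let lengths := chapter_flat.map (fun s => PySem.Str.len s)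
  let bounds := (lengths.foldl (fun (st : List Int × Int) n => (st.1 ++ [st.2 + n], st.2 + n)) ([0], 0)).1
  (bounds.zip bounds.tail).map (fun p => [("span", [("start", p.1), ("end", p.2)])])

-- ===== PRECONDITION & SPEC =====
def Spec_get_segment_annotation (chapter_flat : List String) (out : List (List (String × List (String × Int)))) : Prop := out = get_segment_annotation_alt chapter_flat
instance (chapter_flat : List String) (out : List (List (String × List (String × Int)))) : Decidable (Spec_get_segment_annotation chapter_flat out) := by unfold Spec_get_segment_annotation; infer_instance

-- ===== CLAIM (what is proved, stated in full; the proofs are below) =====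
def Claim_equal_get_segment_annotation : Prop := ∀ (chapter_flat : List String), Dom_get_segment_annotation chapter_flat → Spec_get_segment_annotation chapter_flat (get_segment_annotation chapter_flat)

-- ===== LEMMAS AND PROOFS =====

-- common spine: the list of (start, end) spans for lengths l starting at pos
def pvSpine : Int → List Int → List (Int × Int)
  | _, [] => []
  | pos, n :: rest => (pos, pos + n) :: pvSpine (pos + n) rest

def pvMk (p : Int × Int) : List (String × List (String × Int)) :=
  [("span", [("start", p.1), ("end", p.2)])]

-- prefix sums of l after pos (excluding pos itself)
def pvPS : Int → List Int → List Int
  | _, [] => []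
  | pos, n :: rest => (pos + n) :: pvPS (pos + n) rest

lemma lemA (l : List Int) : ∀ (pos : Int) (acc : List (List (String × List (String × Int)))),
    (l.foldl (fun st n => (st.1 ++ [pvMk (st.2, st.2 + n)], st.2 + n)) (acc, pos)).1
      = acc ++ (pvSpine pos l).map pvMk := by
  induction l with
  | nil => intro pos acc; simp [pvSpine]
  | cons n rest ih =>
      intro pos acc
      simp only [List.foldl_cons, pvSpine, List.map_cons]
      rw [ih]
      simp

lemma lemB (l : List Int) : ∀ (pos : Int) (bacc : List Int),
    (l.foldl (fun (st : List Int × Int) n => (st.1 ++ [st.2 + n], st.2 + n)) (bacc ++ [pos], pos)).1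
      = bacc ++ pos :: pvPS pos l := by
  induction l with
  | nil => intro pos bacc; simp [pvPS]
  | cons n rest ih =>
      intro pos bacc
      simp only [List.foldl_cons, pvPS]
      have := ih (pos + n) (bacc ++ [pos])
      simpa using this

lemma zip_ps (l : List Int) : ∀ (pos : Int),
    (pos :: pvPS pos l).zip (pvPS pos l) = pvSpine pos l := by
  induction l with
  | nil => intro pos; simp [pvPS, pvSpine]
  | cons n rest ih =>
      intro pos
      simp only [pvPS, pvSpine, List.zip_cons_cons]
      rw [ih]

lemma A_eq_spine (chapter_flat : List String) :
    get_segment_annotation chapter_flat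
      = (pvSpine 0 (chapter_flat.map (fun s => PySem.Str.len s))).map pvMk := by
  unfold get_segment_annotation
  have h : ∀ (l : List String) (st : List (List (String × List (String × Int))) × Int),
      l.foldl (fun st segment =>
          (st.1 ++ [[("span", [("start", st.2), ("end", st.2 + PySem.Str.len segment)])]],
            st.2 + PySem.Str.len segment)) st
        = (l.map (fun s => PySem.Str.len s)).foldl
            (fun st n => (st.1 ++ [pvMk (st.2, st.2 + n)], st.2 + n)) st := by
    intro l
    induction l with
    | nil => intro st; rfl
    | cons s rest ih => intro st; simp only [List.foldl_cons, List.map_cons, pvMk]; exact ih _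
  rw [h, lemA]
  simp

lemma B_eq_spine (chapter_flat : List String) :
    get_segment_annotation_alt chapter_flat
      = (pvSpine 0 (chapter_flat.map (fun s => PySem.Str.len s))).map pvMk := by
  unfold get_segment_annotation_alt
  have hb := lemB (chapter_flat.map (fun s => PySem.Str.len s)) 0 []
  simp only [List.nil_append] at hb
  simp only [hb, List.tail_cons, zip_ps]
  rfl

-- ===== VERDICT (by name: the statement is the Claim_ definition above) =====
theorem get_segment_annotation_spec : Claim_equal_get_segment_annotation := by
  intro chapter_flat _
  unfold Spec_get_segment_annotation
  rw [A_eq_spine, B_eq_spine]
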